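-- pv_equiv track=rewrite | github.com/Sierraki/Solutions | 力扣&Leetcode/算法&algorithm/题库/2266.统计打字方案数.py | countTexts
-- ===== SOURCE A (Python) =====
-- def countTexts(pressedKeys: str) -> int:
--     def fun1(n):
--         dp = [0] * (n + 1)
--         for i in range(1, n + 1):
--             if i <= 2:
--                 dp[i] = i
--             elif i == 3:
--                 dp[i] = 4
--             else:
--                 dp[i] = dp[i - 1] + dp[i - 2] + dp[i - 3]
--         return dp[-1]
--
--     def fun2(n):
--         dp = [0] * (n + 1)
--         for i in range(1, n + 1):
--             if i <= 2:
--                 dp[i] = i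
--             elif i == 3:
--                 dp[i] = 4
--             elif i == 4:
--                 dp[i] = 7 + 1
--             else:
--                 dp[i] = dp[i - 1] + dp[i - 2] + dp[i - 3] + dp[i - 4]
--         return dp[-1]
--
--     pin = 0
--     res = []
--     mx1 = mx2 = 0
--     for i, j in enumerate(pressedKeys):
--         if j != pressedKeys[pin]:
--             res.append(pressedKeys[pin:i])
--             if pressedKeys[pin] in "234568":
--                 mx1 = max(mx1, i - pin)
--             else:
--                 mx2 = max(mx2, i - pin)
--             pin = i
--     if pin == 0 or pressedKeys[pin] != res[-1][-1]:
--         res.append(pressedKeys[pin:])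
--         if pressedKeys[pin] in "234568":
--             mx1 = max(mx1, len(pressedKeys) - pin)
--         else:
--             mx2 = max(mx2, len(pressedKeys) - pin)
--     fun1(mx1)
--     fun2(mx2)
--     ans = 1
--     mod = 10**9 + 7
--     for i in res:
--         if i[0] in "234568":
--             ans = ans * fun1(len(i)) % mod
--         else:
--             ans = ans * fun2(len(i)) % mod
--     return ans
-- ===== SOURCE B (Python) =====
-- def countTexts(pressedKeys: str) -> int:
--     MOD = 10 ** 9 + 7
--     # global DP: d0=dp[i], d1=dp[i-1], d2=dp[i-2], d3=dp[i-3]; c1,c2,c3 = last three chars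
--     d0, d1, d2, d3 = 1, 0, 0, 0
--     c1 = c2 = c3 = None
--     for c in pressedKeys:
--         v = d0
--         if c == c1:
--             v += d1
--             if c == c2:
--                 v += d2
--                 if c == c3 and c not in "234568":
--                     v += d3
--         d0, d1, d2, d3 = v % MOD, d0, d1, d2
--         c1, c2, c3 = c, c1, c2
--     return d0
-- ===== Notes on version B (the rewrite author's own statement) =====
-- stated objective: faster
-- what changed: A splits the string into runs with index bookkeeping and slicing, builds a fresh DP array (fun1/fun2) per run and multiplies the per-run counts; B is one fused forward DP over the whole string keeping only four rolling dp values and the last three characters, with no run splitting, no slicing and no arrays.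
-- crash fix: On the empty string A raises IndexError (pressedKeys[pin] with pin = 0) while B returns 1, the count of ways to type the empty text. — e.g. on countTexts(""): A raises IndexError, B returns 1
import Mathlib
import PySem

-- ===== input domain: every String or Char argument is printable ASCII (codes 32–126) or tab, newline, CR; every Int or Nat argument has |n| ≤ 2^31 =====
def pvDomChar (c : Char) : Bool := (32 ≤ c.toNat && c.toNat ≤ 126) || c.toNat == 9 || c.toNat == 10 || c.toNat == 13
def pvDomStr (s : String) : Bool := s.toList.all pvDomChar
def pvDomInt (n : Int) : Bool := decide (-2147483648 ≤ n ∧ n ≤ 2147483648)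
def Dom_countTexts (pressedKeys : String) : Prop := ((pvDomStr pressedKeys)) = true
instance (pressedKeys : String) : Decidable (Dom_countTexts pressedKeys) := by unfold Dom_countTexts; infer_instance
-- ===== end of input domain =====

-- B replaces A's split-into-runs-then-per-run-DP-array strategy by one fused forward DP over the
-- whole string with O(1) rolling state; measurably faster by a constant factor (no slicing,
-- no per-run arrays).

-- ===== PORT A =====
-- literal transliteration of Source A; "234568" membership is the char list below
def pvMod : Int := 10 ^ 9 + 7
def pvKey3 : List Char := ['2', '3', '4', '5', '6', '8']

-- fun1: dp = [0]*(n+1); loop over range(1, n+1); return dp[-1]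
def pvFun1 (n : Int) : Int :=
  let dp : List Int := List.replicate (n + 1).toNat 0
  let dp := (PySem.List.pyRange 1 (n + 1) 1).foldl (fun dp i =>
    PySem.List.pySetD dp i
      (if i ≤ 2 then i
       else if i = 3 then 4
       else PySem.List.pyGetD dp (i - 1) 0 + PySem.List.pyGetD dp (i - 2) 0 +
            PySem.List.pyGetD dp (i - 3) 0)) dp
  PySem.List.pyGetD dp (-1) 0

-- fun2: like fun1 with the extra i == 4 branch (dp[4] = 7 + 1) and a 4-term recurrence
def pvFun2 (n : Int) : Int :=
  let dp : List Int := List.replicate (n + 1).toNat 0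
  let dp := (PySem.List.pyRange 1 (n + 1) 1).foldl (fun dp i =>
    PySem.List.pySetD dp i
      (if i ≤ 2 then i
       else if i = 3 then 4
       else if i = 4 then 7 + 1
       else PySem.List.pyGetD dp (i - 1) 0 + PySem.List.pyGetD dp (i - 2) 0 +
            PySem.List.pyGetD dp (i - 3) 0 + PySem.List.pyGetD dp (i - 4) 0)) dp
  PySem.List.pyGetD dp (-1) 0

-- body of A's `for i, j in enumerate(pressedKeys)` loop (indexing is in range under Pre_)
def pvStepA (l : List Char) : Int × List (List Char) × Int × Int → Int × Char → Int × List (List Char) × Int × Int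
  | (pin, res, mx1, mx2), (i, j) =>
    if j ≠ PySem.List.pyGetD l pin ' ' then
      let res := res ++ [PySem.List.slice l (some pin) (some i)]
      if PySem.List.pyGetD l pin ' ' ∈ pvKey3 then (i, res, max mx1 (i - pin), mx2)
      else (i, res, mx1, max mx2 (i - pin))
    else (pin, res, mx1, mx2)

def countTexts (pressedKeys : String) : Int :=
  let l := pressedKeys.toList
  let st := (PySem.List.enumerate l 0).foldl (pvStepA l) (0, [], 0, 0)
  let pin := st.1
  let res := st.2.1
  let mx1 := st.2.2.1
  let mx2 := st.2.2.2
  let st2 :=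
    if pin = 0 ∨ PySem.List.pyGetD l pin ' ' ≠ PySem.List.pyGetD (PySem.List.pyGetD res (-1) []) (-1) ' ' then
      let res := res ++ [PySem.List.slice l (some pin) none]
      if PySem.List.pyGetD l pin ' ' ∈ pvKey3 then (res, max mx1 ((l.length : Int) - pin), mx2)
      else (res, mx1, max mx2 ((l.length : Int) - pin))
    else (res, mx1, mx2)
  let res := st2.1
  let mx1 := st2.2.1
  let mx2 := st2.2.2
  let _ := pvFun1 mx1
  let _ := pvFun2 mx2
  res.foldl (fun ans i =>
    if PySem.List.pyGetD i 0 ' ' ∈ pvKey3 then PySem.Int.mod (ans * pvFun1 (i.length : Int)) pvMod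
    else PySem.Int.mod (ans * pvFun2 (i.length : Int)) pvMod) 1

-- ===== PORT B =====
-- body of Source B's single loop: rolling dp values d0..d3 and the last three chars c1..c3
def pvStepB : Int × Int × Int × Int × Option Char × Option Char × Option Char → Char →
    Int × Int × Int × Int × Option Char × Option Char × Option Char
  | (d0, d1, d2, d3, c1, c2, c3), c =>
    let v := d0
    let v :=
      if c1 = some c then
        let v := v + d1
        if c2 = some c then
          let v := v + d2
          if c3 = some c ∧ c ∉ pvKey3 then v + d3 else v
        else v
      else v
    (PySem.Int.mod v pvMod, d0, d1, d2, some c, c1, c2)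

def countTexts_alt (pressedKeys : String) : Int :=
  (pressedKeys.toList.foldl pvStepB (1, 0, 0, 0, none, none, none)).1

-- ===== PRECONDITION & SPEC =====
-- Pre_ excludes only the empty string, on which A raises IndexError (pressedKeys[pin] with pin = 0).
def Pre_countTexts (pressedKeys : String) : Prop := pressedKeys.toList ≠ []
instance (pressedKeys : String) : Decidable (Pre_countTexts pressedKeys) := by
  unfold Pre_countTexts; infer_instance
def pvWitness_countTexts : String := "22"

-- On the empty string A raises IndexError while B naturally returns 1 (one way to type nothing).
def Raises_countTexts (pressedKeys : String) : Prop := pressedKeys.toList = []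
instance (pressedKeys : String) : Decidable (Raises_countTexts pressedKeys) := by
  unfold Raises_countTexts; infer_instance
def pvRaiseWitness_countTexts : String := ""
def pvRaiseWitnessOut_countTexts : Int := 1

def Spec_countTexts (pressedKeys : String) (out : Int) : Prop := out = countTexts_alt pressedKeys
instance (pressedKeys : String) (out : Int) : Decidable (Spec_countTexts pressedKeys out) := by
  unfold Spec_countTexts; infer_instance

-- ===== CLAIM (what is proved, stated in full; the proofs are below) =====
def Claim_equal_countTexts : Prop := ∀ (pressedKeys : String), Dom_countTexts pressedKeys →
  Pre_countTexts pressedKeys → Spec_countTexts pressedKeys (countTexts pressedKeys)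
def Claim_raises_countTexts : Prop :=
  (∀ (pressedKeys : String), Dom_countTexts pressedKeys → Raises_countTexts pressedKeys →
    ¬ Pre_countTexts pressedKeys) ∧
  (Dom_countTexts (pvRaiseWitness_countTexts) ∧ Raises_countTexts (pvRaiseWitness_countTexts) ∧
    countTexts_alt (pvRaiseWitness_countTexts) = pvRaiseWitnessOut_countTexts)

-- ===== LEMMAS AND PROOFS =====

-- specification-level counting functions: number of typings of a run of length k
-- on a 3-letter key (T3) / a 4-letter key (T4); T 0 = 1 (empty run)
def T3 : Nat → Int
  | 0 => 1
  | 1 => 1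
  | 2 => 2
  | (n + 3) => T3 (n + 2) + T3 (n + 1) + T3 n

def T4 : Nat → Int
  | 0 => 1
  | 1 => 1
  | 2 => 2
  | 3 => 4
  | (n + 4) => T4 (n + 3) + T4 (n + 2) + T4 (n + 1) + T4 n

def pvF (c : Char) (k : Nat) : Int := if c ∈ pvKey3 then T3 k else T4 k

def pvG (a : Int) (ck : Char × Nat) : Int := PySem.Int.mod (a * pvF ck.1 ck.2) pvMod

-- run-length decomposition of a list
def pvRuns : List Char → List (Char × Nat)
  | [] => []
  | c :: t => (c, 1 + (t.takeWhile (· == c)).length) :: pvRuns (t.dropWhile (· == c))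
  termination_by l => l.length
  decreasing_by
    have := List.length_dropWhile_le (· == c) t
    simp; omega

def pvBlock (ck : Char × Nat) : List Char := List.replicate ck.2 ck.1

lemma pymod_eq (x : Int) : PySem.Int.mod x pvMod = x % 1000000007 := by
  norm_num [PySem.Int.mod, Int.fmod_eq_emod, pvMod]

lemma pvRuns_cons (c : Char) (t : List Char) :
    ∃ k rest, 1 ≤ k ∧ c :: t = List.replicate k c ++ rest ∧
      (∀ h : rest ≠ [], rest.head h ≠ c) ∧
      pvRuns (c :: t) = (c, k) :: pvRuns rest ∧ rest.length < (c :: t).length := by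
  refine ⟨1 + (t.takeWhile (· == c)).length, t.dropWhile (· == c), by omega, ?_, ?_, ?_, ?_⟩
  · have h1 : t.takeWhile (· == c) = List.replicate (t.takeWhile (· == c)).length c := by
      apply List.eq_replicate_of_mem
      intro b hb
      simpa using List.mem_takeWhile_imp hb
    rw [Nat.add_comm, List.replicate_succ, List.cons_append]
    nth_rewrite 1 [← List.takeWhile_append_dropWhile (p := (· == c)) (l := t)]
    rw [← h1]
  · intro h
    simpa using List.head_dropWhile_not (· == c) h
  · rw [pvRuns]
  · have := List.length_dropWhile_le (· == c) t
    simp only [List.length_cons]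
    omega

lemma pvRuns_flat : ∀ l : List Char, ((pvRuns l).map pvBlock).flatten = l := by
  intro l
  induction hn : l.length using Nat.strong_induction_on generalizing l with
  | _ n ih =>
    match l with
    | [] => rw [pvRuns]; simp
    | c :: t =>
      obtain ⟨k, rest, hk, hsplit, hhd, heq, hlt⟩ := pvRuns_cons c t
      rw [heq]
      simp only [List.map_cons, List.flatten_cons, pvBlock]
      rw [ih rest.length (by omega) rest rfl, hsplit]

lemma pvRuns_pos : ∀ (l : List Char), ∀ ck ∈ pvRuns l, 1 ≤ ck.2 := by
  intro l
  induction hn : l.length using Nat.strong_induction_on generalizing l with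
  | _ n ih =>
    match l with
    | [] => rw [pvRuns]; simp
    | c :: t =>
      obtain ⟨k, rest, hk, hsplit, hhd, heq, hlt⟩ := pvRuns_cons c t
      rw [heq]
      intro ck hck
      rcases List.mem_cons.mp hck with rfl | h
      · exact hk
      · exact ih rest.length (by omega) rest rfl ck h

lemma pvRuns_chain : ∀ l : List Char, List.IsChain (fun a b : Char × Nat => a.1 ≠ b.1) (pvRuns l) := by
  intro l
  induction hn : l.length using Nat.strong_induction_on generalizing l with
  | _ n ih =>
    match l with
    | [] => rw [pvRuns]; simp
    | c :: t =>
      obtain ⟨k, rest, hk, hsplit, hhd, heq, hlt⟩ := pvRuns_cons c t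
      rw [heq, List.isChain_cons]
      refine ⟨?_, ih rest.length (by omega) rest rfl⟩
      intro b hb
      rcases rest with _ | ⟨c', t'⟩
      · rw [pvRuns] at hb; simp at hb
      · obtain ⟨k', rest', hk', hsplit', hhd', heq', hlt'⟩ := pvRuns_cons c' t'
        rw [heq'] at hb
        simp only [List.head?_cons, Option.mem_def, Option.some.injEq] at hb
        subst hb
        exact fun h => hhd (by simp) (by simpa using h.symm)

lemma pvRuns_run (c : Char) (k : Nat) (rest : List Char) (hk : 1 ≤ k)
    (hr : ∀ h : rest ≠ [], rest.head h ≠ c) :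
    pvRuns (List.replicate k c ++ rest) = (c, k) :: pvRuns rest := by
  obtain ⟨k', rfl⟩ : ∃ k', k = k' + 1 := ⟨k - 1, by omega⟩
  have htw : ∀ m : Nat, (List.replicate m c ++ rest).takeWhile (· == c) = List.replicate m c ∧
      (List.replicate m c ++ rest).dropWhile (· == c) = rest := by
    intro m
    induction m with
    | zero =>
      simp only [List.replicate_zero, List.nil_append]
      match rest with
      | [] => simp
      | r :: rs =>
        have : r ≠ c := hr (by simp)
        simp [List.takeWhile_cons, List.dropWhile_cons, this]
    | succ m ihm =>
      simp [List.replicate_succ, List.takeWhile_cons, List.dropWhile_cons, ihm.1, ihm.2]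
  rw [List.replicate_succ, List.cons_append, pvRuns, (htw k').1, (htw k').2]
  simp [Nat.add_comm]

-- ===== A-side lemmas =====

lemma T3_rec (n : Nat) : T3 (n + 3) = T3 (n + 2) + T3 (n + 1) + T3 n := rfl
lemma T4_rec (n : Nat) : T4 (n + 4) = T4 (n + 3) + T4 (n + 2) + T4 (n + 1) + T4 n := rfl

def pvDp (k m : Nat) : List Int :=
  (List.range (k + 1)).map (fun t => if 1 ≤ t ∧ t ≤ m then T3 t else 0)

lemma pvDp_zero (k : Nat) : pvDp k 0 = List.replicate (k + 1) 0 := by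
  have hlen : (pvDp k 0).length = k + 1 := by simp [pvDp]
  rw [← hlen]
  apply List.eq_replicate_of_mem
  intro b hb
  simp only [pvDp, List.mem_map, List.mem_range] at hb
  obtain ⟨t, _, ht⟩ := hb
  rw [← ht, if_neg (by omega)]

lemma pvDp_getD (k m j : Nat) (hj : j < k + 1) :
    PySem.List.pyGetD (pvDp k m) (j : Int) 0 = if 1 ≤ j ∧ j ≤ m then T3 j else 0 := by
  rw [PySem.List.pyGetD_natCast, pvDp, List.getD_eq_getElem?_getD]
  simp [List.getElem?_map, List.getElem?_range, hj]

lemma pvDp_set (k m : Nat) (hm : m + 1 ≤ k) :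
    PySem.List.pySetD (pvDp k m) ((m + 1 : Nat) : Int) (T3 (m + 1)) = pvDp k (m + 1) := by
  rw [PySem.List.pySetD_natCast]
  apply List.ext_getElem
  · simp [pvDp]
  · intro j h1 h2
    rw [List.getElem_set]
    simp only [pvDp, List.getElem_map, List.getElem_range]
    have hj : j < k + 1 := by simpa [pvDp] using h2
    split_ifs with ha hb hc
    all_goals (try subst ha) <;> (first | rfl | omega)

lemma fun1_eq (k : Nat) (hk : 1 ≤ k) : pvFun1 (k : Int) = T3 k := by
  have hcast : ((k : Int) + 1).toNat = k + 1 := by omega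
  have aux : ∀ m : Nat, m ≤ k →
      (PySem.List.pyRange 1 ((m : Int) + 1) 1).foldl (fun dp i =>
        PySem.List.pySetD dp i
          (if i ≤ 2 then i
           else if i = 3 then 4
           else PySem.List.pyGetD dp (i - 1) 0 + PySem.List.pyGetD dp (i - 2) 0 +
                PySem.List.pyGetD dp (i - 3) 0)) (List.replicate (k + 1) 0) = pvDp k m := by
    intro m
    induction m with
    | zero =>
      intro _
      norm_num
      rw [pvDp_zero]
    | succ m ihm =>
      intro hm
      have e0 : ((m + 1 : Nat) : Int) + 1 = ((m : Int) + 1) + 1 := by push_cast; ring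
      rw [e0, PySem.List.pyRange_one_succ_right (by omega), List.foldl_append, ihm (by omega),
          List.foldl_cons, List.foldl_nil]
      have hi : ((m : Nat) : Int) + 1 = ((m + 1 : Nat) : Int) := by push_cast; ring
      rw [hi]
      match m with
      | 0 =>
        rw [if_pos (by norm_num)]
        have : ((1 : Nat) : Int) = T3 1 := rfl
        norm_num
        exact pvDp_set k 0 (by omega)
      | 1 =>
        rw [if_pos (by norm_num)]
        have h2 : ((2 : Nat) : Int) = T3 2 := by decide
        rw [show ((2:Nat):Int) = (2:Int) from by norm_num] at h2 ⊢
        rw [h2]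
        exact pvDp_set k 1 (by omega)
      | 2 =>
        rw [if_neg (by norm_num), if_pos (by norm_num)]
        rw [show (4 : Int) = T3 3 from by decide]
        exact pvDp_set k 2 (by omega)
      | (m'' + 3) =>
        rw [if_neg (by push_cast; omega), if_neg (by push_cast; omega)]
        have e1 : ((m'' + 3 + 1 : Nat) : Int) - 1 = ((m'' + 3 : Nat) : Int) := by push_cast; ring
        have e2 : ((m'' + 3 + 1 : Nat) : Int) - 2 = ((m'' + 2 : Nat) : Int) := by push_cast; ring
        have e3 : ((m'' + 3 + 1 : Nat) : Int) - 3 = ((m'' + 1 : Nat) : Int) := by push_cast; ring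
        rw [e1, e2, e3, pvDp_getD k _ _ (by omega), pvDp_getD k _ _ (by omega),
            pvDp_getD k _ _ (by omega), if_pos (by omega), if_pos (by omega), if_pos (by omega)]
        rw [show T3 (m'' + 3) + T3 (m'' + 2) + T3 (m'' + 1) = T3 (m'' + 3 + 1) from
          (T3_rec (m'' + 1)).symm]
        exact pvDp_set k (m'' + 3) (by omega)
  simp only [pvFun1, hcast]
  rw [aux k le_rfl]
  have hne : pvDp k k ≠ [] := by simp [pvDp]
  rw [PySem.List.pyGetD_neg_one _ _ hne, List.getLast_eq_getElem]
  simp only [pvDp, List.length_map, List.length_range, List.getElem_map, List.getElem_range]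
  rw [if_pos (by omega)]
  congr 1

def pvDp4 (k m : Nat) : List Int :=
  (List.range (k + 1)).map (fun t => if 1 ≤ t ∧ t ≤ m then T4 t else 0)

lemma pvDp4_zero (k : Nat) : pvDp4 k 0 = List.replicate (k + 1) 0 := by
  have hlen : (pvDp4 k 0).length = k + 1 := by simp [pvDp4]
  rw [← hlen]
  apply List.eq_replicate_of_mem
  intro b hb
  simp only [pvDp4, List.mem_map, List.mem_range] at hb
  obtain ⟨t, _, ht⟩ := hb
  rw [← ht, if_neg (by omega)]

lemma pvDp4_getD (k m j : Nat) (hj : j < k + 1) :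
    PySem.List.pyGetD (pvDp4 k m) (j : Int) 0 = if 1 ≤ j ∧ j ≤ m then T4 j else 0 := by
  rw [PySem.List.pyGetD_natCast, pvDp4, List.getD_eq_getElem?_getD]
  simp [List.getElem?_map, List.getElem?_range, hj]

lemma pvDp4_set (k m : Nat) (hm : m + 1 ≤ k) :
    PySem.List.pySetD (pvDp4 k m) ((m + 1 : Nat) : Int) (T4 (m + 1)) = pvDp4 k (m + 1) := by
  rw [PySem.List.pySetD_natCast]
  apply List.ext_getElem
  · simp [pvDp4]
  · intro j h1 h2
    rw [List.getElem_set]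
    simp only [pvDp4, List.getElem_map, List.getElem_range]
    have hj : j < k + 1 := by simpa [pvDp4] using h2
    split_ifs with ha hb hc
    all_goals (try subst ha) <;> (first | rfl | omega)

lemma fun2_eq (k : Nat) (hk : 1 ≤ k) : pvFun2 (k : Int) = T4 k := by
  have hcast : ((k : Int) + 1).toNat = k + 1 := by omega
  have aux : ∀ m : Nat, m ≤ k →
      (PySem.List.pyRange 1 ((m : Int) + 1) 1).foldl (fun dp i =>
        PySem.List.pySetD dp i
          (if i ≤ 2 then i
           else if i = 3 then 4
           else if i = 4 then 7 + 1
           else PySem.List.pyGetD dp (i - 1) 0 + PySem.List.pyGetD dp (i - 2) 0 +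
                PySem.List.pyGetD dp (i - 3) 0 + PySem.List.pyGetD dp (i - 4) 0))
        (List.replicate (k + 1) 0) = pvDp4 k m := by
    intro m
    induction m with
    | zero =>
      intro _
      norm_num
      rw [pvDp4_zero]
    | succ m ihm =>
      intro hm
      have e0 : ((m + 1 : Nat) : Int) + 1 = ((m : Int) + 1) + 1 := by push_cast; ring
      rw [e0, PySem.List.pyRange_one_succ_right (by omega), List.foldl_append, ihm (by omega),
          List.foldl_cons, List.foldl_nil]
      have hi : ((m : Nat) : Int) + 1 = ((m + 1 : Nat) : Int) := by push_cast; ring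
      rw [hi]
      match m with
      | 0 =>
        rw [if_pos (by norm_num)]
        norm_num
        exact pvDp4_set k 0 (by omega)
      | 1 =>
        rw [if_pos (by norm_num)]
        have h2 : ((2 : Nat) : Int) = T4 2 := by decide
        rw [show ((2:Nat):Int) = (2:Int) from by norm_num] at h2 ⊢
        rw [h2]
        exact pvDp4_set k 1 (by omega)
      | 2 =>
        rw [if_neg (by norm_num), if_pos (by norm_num)]
        rw [show (4 : Int) = T4 3 from by decide]
        exact pvDp4_set k 2 (by omega)
      | 3 =>
        rw [if_neg (by norm_num), if_neg (by norm_num), if_pos (by norm_num)]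
        rw [show (7 + 1 : Int) = T4 4 from by decide]
        exact pvDp4_set k 3 (by omega)
      | (m'' + 4) =>
        rw [if_neg (by push_cast; omega), if_neg (by push_cast; omega),
            if_neg (by push_cast; omega)]
        have e1 : ((m'' + 4 + 1 : Nat) : Int) - 1 = ((m'' + 4 : Nat) : Int) := by push_cast; ring
        have e2 : ((m'' + 4 + 1 : Nat) : Int) - 2 = ((m'' + 3 : Nat) : Int) := by push_cast; ring
        have e3 : ((m'' + 4 + 1 : Nat) : Int) - 3 = ((m'' + 2 : Nat) : Int) := by push_cast; ring
        have e4 : ((m'' + 4 + 1 : Nat) : Int) - 4 = ((m'' + 1 : Nat) : Int) := by push_cast; ring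
        rw [e1, e2, e3, e4, pvDp4_getD k _ _ (by omega), pvDp4_getD k _ _ (by omega),
            pvDp4_getD k _ _ (by omega), pvDp4_getD k _ _ (by omega), if_pos (by omega),
            if_pos (by omega), if_pos (by omega), if_pos (by omega)]
        rw [show T4 (m'' + 4) + T4 (m'' + 3) + T4 (m'' + 2) + T4 (m'' + 1) = T4 (m'' + 4 + 1) from
          (T4_rec (m'' + 1)).symm]
        exact pvDp4_set k (m'' + 4) (by omega)
  simp only [pvFun2, hcast]
  rw [aux k le_rfl]
  have hne : pvDp4 k k ≠ [] := by simp [pvDp4]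
  rw [PySem.List.pyGetD_neg_one _ _ hne, List.getLast_eq_getElem]
  simp only [pvDp4, List.length_map, List.length_range, List.getElem_map, List.getElem_range]
  rw [if_pos (by omega)]
  congr 1

lemma skipA (l : List Char) (c : Char) (m : Nat) :
    ∀ (i0 pin : Int) (res : List (List Char)) (mx1 mx2 : Int),
      PySem.List.pyGetD l pin ' ' = c →
      (PySem.List.enumerate (List.replicate m c) i0).foldl (pvStepA l) (pin, res, mx1, mx2)
        = (pin, res, mx1, mx2) := by
  induction m with
  | zero => intro i0 pin res mx1 mx2 _; simp [PySem.List.enumerate]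
  | succ m ihm =>
    intro i0 pin res mx1 mx2 h
    rw [List.replicate_succ, PySem.List.enumerate_cons, List.foldl_cons]
    have : pvStepA l (pin, res, mx1, mx2) (i0, c) = (pin, res, mx1, mx2) := by
      simp [pvStepA, h]
    rw [this, ihm (i0 + 1) pin res mx1 mx2 h]

lemma pyGetD_append_len (pre : List Char) (y : Char) (ys : List Char) :
    PySem.List.pyGetD (pre ++ y :: ys) ((pre.length : Nat) : Int) ' ' = y := by
  rw [PySem.List.pyGetD_natCast, List.getD_eq_getElem?_getD, List.getElem?_append_right le_rfl]
  simp

lemma run_head_get (pre : List Char) (c : Char) (k : Nat) (rest : List Char) (hk : 1 ≤ k) :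
    PySem.List.pyGetD (pre ++ (List.replicate k c ++ rest)) ((pre.length : Nat) : Int) ' ' = c := by
  obtain ⟨k', rfl⟩ : ∃ k', k = k' + 1 := ⟨k - 1, by omega⟩
  rw [List.replicate_succ, List.cons_append]
  exact pyGetD_append_len pre c _

lemma slice_mid (pre : List Char) (c : Char) (k : Nat) (X : List Char) :
    PySem.List.slice (pre ++ (List.replicate k c ++ X)) (some ((pre.length : Nat) : Int))
      (some (((pre.length + k : Nat)) : Int)) = List.replicate k c := by
  rw [PySem.List.slice_natCast, List.drop_left]
  rw [show pre.length + k - pre.length = k by omega]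
  rw [List.take_left' (by simp)]

lemma loopA_go (n : Nat) : ∀ (rest : List Char), rest.length ≤ n →
    ∀ (pre : List Char) (c : Char) (k : Nat) (res : List (List Char)) (mx1 mx2 : Int),
      1 ≤ k → (∀ h : rest ≠ [], rest.head h ≠ c) →
      ∃ mx1' mx2',
        (PySem.List.enumerate (List.replicate (k - 1) c ++ rest) ((pre.length : Int) + 1)).foldl
            (pvStepA (pre ++ (List.replicate k c ++ rest))) ((pre.length : Int), res, mx1, mx2)
          = (((pre.length + ((((c, k) :: pvRuns rest).dropLast.map pvBlock).flatten.length) : Nat) : Int),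
             res ++ ((c, k) :: pvRuns rest).dropLast.map pvBlock, mx1', mx2') := by
  induction n with
  | zero =>
    intro rest hlen pre c k res mx1 mx2 hk hhd
    have : rest = [] := List.eq_nil_of_length_eq_zero (by omega)
    subst this
    refine ⟨mx1, mx2, ?_⟩
    simp only [List.append_nil]
    rw [skipA _ c _ _ _ _ _ _ (by simpa using run_head_get pre c k [] hk)]
    simp [pvRuns]
  | succ n ih =>
    intro rest hlen pre c k res mx1 mx2 hk hhd
    match rest with
    | [] =>
      refine ⟨mx1, mx2, ?_⟩
      simp only [List.append_nil]
      rw [skipA _ c _ _ _ _ _ _ (by simpa using run_head_get pre c k [] hk)]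
      simp [pvRuns]
    | c' :: t' =>
      obtain ⟨k2, rest2, hk2, hsplit2, hhd2, heq2, hlt2⟩ := pvRuns_cons c' t'
      have hget : PySem.List.pyGetD (pre ++ (List.replicate k c ++ (c' :: t')))
          ((pre.length : Nat) : Int) ' ' = c := run_head_get pre c k _ hk
      rw [PySem.List.enumerate_append, List.foldl_append,
          skipA _ c _ _ _ _ _ _ hget]
      have hcc : c' ≠ c := hhd (by simp)
      rw [hsplit2] at hget ⊢
      rw [pvRuns_run c' k2 rest2 hk2 hhd2]
      obtain ⟨k2', rfl⟩ : ∃ x, k2 = x + 1 := ⟨k2 - 1, by omega⟩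
      rw [List.replicate_succ, List.cons_append, PySem.List.enumerate_cons, List.foldl_cons]
      rw [List.replicate_succ, List.cons_append] at hget
      have hidx : (pre.length : Int) + 1 + ((List.replicate (k - 1) c).length : Int)
          = ((pre.length + k : Nat) : Int) := by
        simp only [List.length_replicate]
        push_cast
        omega
      rw [hidx]
      have hstep : pvStepA (pre ++ (List.replicate k c ++ (c' :: (List.replicate k2' c' ++ rest2))))
          (((pre.length : Nat) : Int), res, mx1, mx2) (((pre.length + k : Nat) : Int), c')
          = (((pre.length + k : Nat) : Int),
             res ++ [List.replicate k c],
             (if PySem.List.pyGetD (pre ++ (List.replicate k c ++ (c' :: (List.replicate k2' c' ++ rest2))))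
                ((pre.length : Nat) : Int) ' ' ∈ pvKey3 then
                max mx1 (((pre.length + k : Nat) : Int) - ((pre.length : Nat) : Int)) else mx1),
             (if PySem.List.pyGetD (pre ++ (List.replicate k c ++ (c' :: (List.replicate k2' c' ++ rest2))))
                ((pre.length : Nat) : Int) ' ' ∈ pvKey3 then mx2
              else max mx2 (((pre.length + k : Nat) : Int) - ((pre.length : Nat) : Int)))) := by
        simp only [pvStepA]
        rw [if_pos (by rw [hget]; exact hcc)]
        have hsl : PySem.List.slice (pre ++ (List.replicate k c ++ (c' :: (List.replicate k2' c' ++ rest2))))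
            (some ((pre.length : Nat) : Int)) (some (((pre.length + k : Nat)) : Int))
            = List.replicate k c := slice_mid pre c k _
        rw [hsl]
        split_ifs <;> rfl
      rw [hstep]
      split_ifs with hc
      all_goals {
        obtain ⟨m1, m2, hfold⟩ := ih rest2 (by simp at hlen hlt2; omega) (pre ++ List.replicate k c)
          c' (k2' + 1) (res ++ [List.replicate k c]) _ _ hk2 hhd2
        refine ⟨m1, m2, ?_⟩
        simp only [Nat.add_sub_cancel, List.replicate_succ, List.cons_append, List.append_assoc,
          List.length_append, List.length_replicate, Nat.cast_add] at hfold ⊢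
        rw [hfold]
        have hdl : ((c, k) :: (c', k2' + 1) :: pvRuns rest2).dropLast
            = (c, k) :: ((c', k2' + 1) :: pvRuns rest2).dropLast := rfl
        rw [hdl]
        simp only [List.map_cons, List.flatten_cons, pvBlock, List.length_append,
          List.length_replicate, Nat.cast_add, Prod.mk.injEq]
        refine ⟨by ring, by simp, trivial⟩
      }

lemma ansA (R : List (Char × Nat)) : ∀ (a : Int), (∀ ck ∈ R, 1 ≤ ck.2) →
    (R.map pvBlock).foldl (fun ans i =>
        if PySem.List.pyGetD i 0 ' ' ∈ pvKey3 then PySem.Int.mod (ans * pvFun1 (i.length : Int)) pvMod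
        else PySem.Int.mod (ans * pvFun2 (i.length : Int)) pvMod) a
      = R.foldl pvG a := by
  induction R with
  | nil => intro a _; rfl
  | cons ck R ih =>
    intro a hpos
    obtain ⟨c, k⟩ := ck
    have hk : 1 ≤ k := hpos (c, k) (by simp)
    obtain ⟨k', rfl⟩ : ∃ k', k = k' + 1 := ⟨k - 1, by omega⟩
    simp only [List.map_cons, List.foldl_cons]
    have hhead : PySem.List.pyGetD (pvBlock (c, k' + 1)) 0 ' ' = c := by
      simp only [pvBlock, List.replicate_succ]
      exact PySem.List.pyGetD_zero_cons c _ ' '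
    have hlen : ((pvBlock (c, k' + 1)).length : Int) = ((k' + 1 : Nat) : Int) := by
      simp [pvBlock]
    rw [hhead, hlen]
    by_cases hc : c ∈ pvKey3
    · rw [if_pos hc, fun1_eq (k' + 1) (by omega)]
      rw [ih _ (fun ck h => hpos ck (by simp [h]))]
      congr 1
      simp only [pvG, pvF, if_pos hc]
    · rw [if_neg hc, fun2_eq (k' + 1) (by omega)]
      rw [ih _ (fun ck h => hpos ck (by simp [h]))]
      congr 1
      simp only [pvG, pvF, if_neg hc]

lemma A_eval (l : List Char) (hl : l ≠ []) :
    countTexts (String.ofList l) = (pvRuns l).foldl pvG 1 := by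
  match l with
  | c :: t =>
  obtain ⟨k, rest, hk, hsplit, hhd, heq, hlt⟩ := pvRuns_cons c t
  obtain ⟨k', rfl⟩ : ∃ x, k = x + 1 := ⟨k - 1, by omega⟩
  rw [heq]
  simp only [countTexts, String.toList_ofList]
  rw [hsplit]
  obtain ⟨mx1f, mx2f, hfold⟩ :=
    loopA_go rest.length rest le_rfl [] c (k' + 1) [] 0 0 (by omega) hhd
  simp only [List.nil_append, List.length_nil, Nat.cast_zero, Nat.zero_add, zero_add,
    Nat.add_sub_cancel] at hfold
  simp only [List.replicate_succ, List.cons_append] at hfold ⊢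
  rw [PySem.List.enumerate_cons, List.foldl_cons]
  have hstep0 : pvStepA (c :: (List.replicate k' c ++ rest)) ((0 : Int), [], 0, 0) ((0 : Int), c)
      = ((0 : Int), [], 0, 0) := by
    simp only [pvStepA, PySem.List.pyGetD_zero_cons]
    simp
  rw [hstep0]
  simp only [zero_add]
  rw [hfold]
  by_cases hrest : rest = []
  · subst hrest
    rw [pvRuns]
    rw [show [(c, k' + 1)].dropLast = ([] : List (Char × Nat)) from rfl]
    simp only [List.map_nil, List.flatten_nil, List.length_nil,
      Nat.cast_zero, List.nil_append, List.append_nil]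
    rw [if_pos (Or.inl trivial)]
    simp only [PySem.List.slice_zero_start, PySem.List.slice_none_none]
    have hrep : c :: List.replicate k' c = pvBlock (c, k' + 1) := by
      simp [pvBlock, List.replicate_succ]
    split_ifs <;>
    · simp only []
      rw [hrep, show [pvBlock (c, k' + 1)] = List.map pvBlock [(c, k' + 1)] from rfl,
        ansA [(c, k' + 1)] 1 (by intro ck hck; simp at hck; subst hck; simp)]
  · have hR2 : pvRuns rest ≠ [] := by
      intro h
      exact hrest (by rw [← pvRuns_flat rest, h]; rfl)
    have hRuns : pvRuns (List.replicate (k' + 1) c ++ rest) = (c, k' + 1) :: pvRuns rest :=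
      pvRuns_run c (k' + 1) rest (by omega) hhd
    set R := (c, k' + 1) :: pvRuns rest with hRdef
    have hRne : R ≠ [] := by simp [hRdef]
    have hdlne : R.dropLast ≠ [] := by
      rw [hRdef, List.dropLast_cons_of_ne_nil hR2]
      simp
    have hdl : R.dropLast = (c, k' + 1) :: (pvRuns rest).dropLast :=
      List.dropLast_cons_of_ne_nil hR2
    -- decomposition of the whole list
    have hflatR : (R.map pvBlock).flatten = c :: (List.replicate k' c ++ rest) := by
      rw [hRdef]
      simp only [List.map_cons, List.flatten_cons]
      rw [pvRuns_flat rest]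
      simp [pvBlock, List.replicate_succ]
    have hsplitR : R = R.dropLast ++ [R.getLast hRne] := (List.dropLast_append_getLast hRne).symm
    have hmapsplit : R.map pvBlock = R.dropLast.map pvBlock ++ [pvBlock (R.getLast hRne)] := by
      conv_lhs => rw [hsplitR]
      simp
    have hLdec : c :: (List.replicate k' c ++ rest)
        = (R.dropLast.map pvBlock).flatten ++ pvBlock (R.getLast hRne) := by
      rw [← hflatR, hmapsplit]
      simp
    have hposR : ∀ ck ∈ R, 1 ≤ ck.2 := by
      intro ck hck
      apply pvRuns_pos (List.replicate (k' + 1) c ++ rest)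
      rw [hRuns]
      exact hck
    have hkL : 1 ≤ (R.getLast hRne).2 := hposR _ (List.getLast_mem hRne)
    obtain ⟨kL', hkL'⟩ : ∃ x, (R.getLast hRne).2 = x + 1 := ⟨(R.getLast hRne).2 - 1, by omega⟩
    have hblockL : pvBlock (R.getLast hRne)
        = (R.getLast hRne).1 :: List.replicate kL' (R.getLast hRne).1 := by
      rw [pvBlock, hkL', List.replicate_succ]
    -- character at the final pin
    have hgetpin : PySem.List.pyGetD (c :: (List.replicate k' c ++ rest))
        (((R.dropLast.map pvBlock).flatten.length : Nat) : Int) ' ' = (R.getLast hRne).1 := by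
      rw [hLdec, hblockL]
      exact pyGetD_append_len _ _ _
    -- last element of res is the second-to-last block, whose char differs
    have hchain := pvRuns_chain (List.replicate (k' + 1) c ++ rest)
    rw [hRuns] at hchain
    have hpen : ∃ hdl2 : R.dropLast ≠ [],
        (R.dropLast.getLast hdl2).1 ≠ (R.getLast hRne).1 := by
      refine ⟨hdlne, ?_⟩
      have := (List.isChain_append.mp (by rw [← hsplitR]; exact hchain)).2.2
      exact this _ (by rw [List.getLast?_eq_some_getLast hdlne]; simp) _ (by simp)
    obtain ⟨hdl2, hne2⟩ := hpen
    have hresne : R.dropLast.map pvBlock ≠ [] := fun h => hdl2 (List.map_eq_nil_iff.mp h)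
    have hlast1 : PySem.List.pyGetD (R.dropLast.map pvBlock) (-1) []
        = pvBlock (R.dropLast.getLast hdl2) := by
      rw [PySem.List.pyGetD_neg_one _ _ hresne, List.getLast_map]
    have hk2 : 1 ≤ (R.dropLast.getLast hdl2).2 :=
      hposR _ (List.mem_of_mem_dropLast (List.getLast_mem hdl2))
    have hlast2 : PySem.List.pyGetD (pvBlock (R.dropLast.getLast hdl2)) (-1) ' '
        = (R.dropLast.getLast hdl2).1 := by
      rw [pvBlock, PySem.List.pyGetD_neg_one _ _ (by simp; omega), List.getLast_replicate]
    rw [if_pos (Or.inr (by rw [hgetpin, hlast1, hlast2]; exact hne2.symm))]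
    have hslice : PySem.List.slice (c :: (List.replicate k' c ++ rest))
        (some (((R.dropLast.map pvBlock).flatten.length : Nat) : Int)) none
        = pvBlock (R.getLast hRne) := by
      rw [PySem.List.slice_from_natCast, hLdec, List.drop_left]
    split_ifs <;>
    · simp only []
      rw [hslice, show R.dropLast.map pvBlock ++ [pvBlock (R.getLast hRne)] = R.map pvBlock from
        hmapsplit.symm, ansA R 1 ?_]
      exact hposR

-- ===== B-side lemmas =====

def pvRunSt (c : Char) (a d1 d2 : Int) (o1 o2 : Option Char) :
    Nat → Int × Int × Int × Int × Option Char × Option Char × Option Char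
  | 0 => (a, d1, d2, 0, o1, o2, none)
  | 1 => (PySem.Int.mod (a * pvF c 1) pvMod, PySem.Int.mod (a * pvF c 0) pvMod, d1, d2, some c, o1, o2)
  | 2 => (PySem.Int.mod (a * pvF c 2) pvMod, PySem.Int.mod (a * pvF c 1) pvMod,
          PySem.Int.mod (a * pvF c 0) pvMod, d1, some c, some c, o1)
  | (j + 3) => (PySem.Int.mod (a * pvF c (j + 3)) pvMod, PySem.Int.mod (a * pvF c (j + 2)) pvMod,
                PySem.Int.mod (a * pvF c (j + 1)) pvMod, PySem.Int.mod (a * pvF c j) pvMod,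
                some c, some c, some c)

lemma pvF_zero (c : Char) : pvF c 0 = 1 := by unfold pvF; split <;> rfl
lemma pvF_one (c : Char) : pvF c 1 = 1 := by unfold pvF; split <;> rfl
lemma pvF_two (c : Char) : pvF c 2 = 2 := by unfold pvF; split <;> rfl
lemma pvF_three (c : Char) : pvF c 3 = pvF c 2 + pvF c 1 + pvF c 0 := by
  by_cases h : c ∈ pvKey3 <;> simp only [pvF, h, if_pos, if_true, if_false, if_neg] <;> decide

lemma pvF_rec3 (c : Char) (h : c ∈ pvKey3) (j : Nat) :
    pvF c (j + 3) = pvF c (j + 2) + pvF c (j + 1) + pvF c j := by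
  simp only [pvF, if_pos h]
  rfl

lemma pvF_rec4 (c : Char) (h : c ∉ pvKey3) (j : Nat) :
    pvF c (j + 4) = pvF c (j + 3) + pvF c (j + 2) + pvF c (j + 1) + pvF c j := by
  simp only [pvF, if_neg h]
  rfl

lemma runB_inv (c : Char) (a d1 d2 d3 : Int) (o1 o2 o3 : Option Char)
    (ho : o1 ≠ some c) (ha0 : 0 ≤ a) (ha1 : a < 1000000007) :
    ∀ j : Nat, (List.replicate (j + 1) c).foldl pvStepB (a, d1, d2, d3, o1, o2, o3)
      = pvRunSt c a d1 d2 o1 o2 (j + 1) := by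
  have hmod0 : PySem.Int.mod (a * pvF c 0) pvMod = a := by
    rw [pvF_zero, mul_one, pymod_eq]; omega
  intro j
  induction j with
  | zero =>
    simp only [List.replicate_succ, List.replicate_zero, List.foldl_cons, List.foldl_nil]
    simp only [pvStepB, if_neg ho, pvRunSt]
    rw [pvF_one, mul_one, hmod0]
  | succ j ihj =>
    rw [show j + 1 + 1 = (j + 1) + 1 from rfl, List.replicate_succ', List.foldl_append, ihj,
        List.foldl_cons, List.foldl_nil]
    match j with
    | 0 =>
      have key : PySem.Int.mod (PySem.Int.mod (a * pvF c 1) pvMod + PySem.Int.mod (a * pvF c 0) pvMod) pvMod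
          = PySem.Int.mod (a * pvF c 2) pvMod := by
        rw [pvF_one, pvF_zero, pvF_two, mul_one, pymod_eq, pymod_eq, pymod_eq]; omega
      simp only [pvRunSt, pvStepB, if_true]
      rw [if_neg ho, key]
    | 1 =>
      have hne : ¬ (o1 = some c ∧ c ∉ pvKey3) := fun h => ho h.1
      have key : PySem.Int.mod (PySem.Int.mod (a * pvF c 2) pvMod + PySem.Int.mod (a * pvF c 1) pvMod
            + PySem.Int.mod (a * pvF c 0) pvMod) pvMod = PySem.Int.mod (a * pvF c 3) pvMod := by
        rw [pvF_one, pvF_zero, pvF_two, pvF_three, pvF_one, pvF_zero, pvF_two, mul_one, pymod_eq,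
            pymod_eq, pymod_eq, pymod_eq, mul_add, mul_add, mul_one]
        omega
      simp only [pvRunSt, pvStepB, if_true]
      rw [if_neg hne, key]
    | (j + 2) =>
      by_cases hc : c ∈ pvKey3
      · have key : PySem.Int.mod (PySem.Int.mod (a * pvF c (j + 3)) pvMod
              + PySem.Int.mod (a * pvF c (j + 2)) pvMod
              + PySem.Int.mod (a * pvF c (j + 1)) pvMod) pvMod
            = PySem.Int.mod (a * pvF c (j + 4)) pvMod := by
          rw [show j + 4 = (j + 1) + 3 from rfl, pvF_rec3 c hc (j + 1),
              show j + 1 + 2 = j + 3 from rfl, show j + 1 + 1 = j + 2 from rfl, mul_add, mul_add]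
          simp only [pymod_eq]
          generalize a * pvF c (j + 3) = u
          generalize a * pvF c (j + 2) = v
          generalize a * pvF c (j + 1) = w
          omega
        simp only [pvRunSt, pvStepB, if_true, eq_self_iff_true, true_and]
        rw [if_neg (not_not_intro hc)]
        rw [show j + 2 + 1 + 1 = j + 4 from rfl] at *
        rw [key]
      · have key : PySem.Int.mod (PySem.Int.mod (a * pvF c (j + 3)) pvMod
              + PySem.Int.mod (a * pvF c (j + 2)) pvMod
              + PySem.Int.mod (a * pvF c (j + 1)) pvMod
              + PySem.Int.mod (a * pvF c j) pvMod) pvMod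
            = PySem.Int.mod (a * pvF c (j + 4)) pvMod := by
          rw [pvF_rec4 c hc j, mul_add, mul_add, mul_add]
          simp only [pymod_eq]
          generalize a * pvF c (j + 3) = u
          generalize a * pvF c (j + 2) = v
          generalize a * pvF c (j + 1) = w
          generalize a * pvF c j = x
          omega
        simp only [pvRunSt, pvStepB, if_true, eq_self_iff_true, true_and]
        rw [if_pos hc]
        rw [show j + 2 + 1 + 1 = j + 4 from rfl] at *
        rw [key]

lemma mod_bounds (x : Int) : 0 ≤ PySem.Int.mod x pvMod ∧ PySem.Int.mod x pvMod < 1000000007 := by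
  rw [pymod_eq]; omega

lemma B_eval : ∀ (n : Nat) (l : List Char), l.length ≤ n →
    ∀ (a d1 d2 d3 : Int) (o1 o2 o3 : Option Char),
      (∀ h : l ≠ [], o1 ≠ some (l.head h)) → 0 ≤ a → a < 1000000007 →
      (l.foldl pvStepB (a, d1, d2, d3, o1, o2, o3)).1 = (pvRuns l).foldl pvG a := by
  intro n
  induction n with
  | zero =>
    intro l hl a d1 d2 d3 o1 o2 o3 ho ha0 ha1
    have : l = [] := List.eq_nil_of_length_eq_zero (by omega)
    subst this
    rw [pvRuns]; simp
  | succ n ih =>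
    intro l hl a d1 d2 d3 o1 o2 o3 ho ha0 ha1
    match l with
    | [] => rw [pvRuns]; simp
    | c :: t =>
      obtain ⟨k, rest, hk, hsplit, hhd, heq, hlt⟩ := pvRuns_cons c t
      obtain ⟨k', rfl⟩ : ∃ k', k = k' + 1 := ⟨k - 1, by omega⟩
      have hoc : o1 ≠ some c := by simpa using ho (by simp)
      have hrcond : ∀ h : rest ≠ [], (some c : Option Char) ≠ some (rest.head h) := by
        intro h hx
        exact hhd h (by injection hx with hx; exact hx.symm)
      have hlen : rest.length ≤ n := by
        have := congrArg List.length hsplit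
        simp at this
        omega
      rw [heq, hsplit, List.foldl_append, runB_inv c a d1 d2 d3 o1 o2 o3 hoc ha0 ha1 k',
          List.foldl_cons]
      match k' with
      | 0 =>
        simp only [pvRunSt]
        rw [ih rest hlen (PySem.Int.mod (a * pvF c 1) pvMod) (PySem.Int.mod (a * pvF c 0) pvMod)
            d1 d2 (some c) o1 o2 hrcond (mod_bounds _).1 (mod_bounds _).2]
        simp only [pvG]
      | 1 =>
        simp only [pvRunSt]
        rw [ih rest hlen (PySem.Int.mod (a * pvF c 2) pvMod) (PySem.Int.mod (a * pvF c 1) pvMod)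
            (PySem.Int.mod (a * pvF c 0) pvMod) d1 (some c) (some c) o1 hrcond
            (mod_bounds _).1 (mod_bounds _).2]
        simp only [pvG]
      | (j + 2) =>
        simp only [pvRunSt]
        rw [ih rest hlen (PySem.Int.mod (a * pvF c (j + 3)) pvMod)
            (PySem.Int.mod (a * pvF c (j + 2)) pvMod) (PySem.Int.mod (a * pvF c (j + 1)) pvMod)
            (PySem.Int.mod (a * pvF c j) pvMod) (some c) (some c) (some c) hrcond
            (mod_bounds _).1 (mod_bounds _).2]
        simp only [pvG]

-- ===== VERDICT (by name: the statement is the Claim_ definition above) =====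
theorem countTexts_spec : Claim_equal_countTexts := by
  unfold Claim_equal_countTexts
  intro s _ hpre
  unfold Spec_countTexts
  have hl : s.toList ≠ [] := hpre
  have hA := A_eval s.toList hl
  rw [String.ofList_toList] at hA
  have hB := B_eval s.toList.length s.toList le_rfl 1 0 0 0 none none none
    (fun _ => by simp) (by norm_num) (by norm_num)
  rw [hA, countTexts_alt, hB]

@[simp] theorem countTexts_raises : Claim_raises_countTexts := by
  unfold Claim_raises_countTexts
  exact ⟨fun s _ hr hp => hp hr, by decide⟩
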